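-- pv_equiv track=rewrite | github.com/vivekg-cmu/MCDS-Capstone-Project | model.py | get_token_type_ids
-- ===== SOURCE A (Python) =====
-- def get_token_type_ids(input_ids, sep_id, max_segs):
--     token_type_ids = []
--     ctn, token_type = 0, 0
--     for idx, input_id in enumerate(input_ids):
--         ctn += 1
--         if input_id == sep_id:
--             token_type_ids += [token_type for _ in range(ctn)]
--             ctn = 0
--             token_type += 1
--             max_segs -= 1
--             if max_segs == 1:
--                 # only one seg left, so add type ids of the rest directly
--                 rest_len = len(input_ids) - (idx + 1)
--                 token_type_ids += [token_type for _ in range(rest_len)]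
--                 return token_type_ids
--     if ctn != 0:
--         token_type_ids += [token_type for _ in range(ctn)]
--     return token_type_ids
-- ===== SOURCE B (Python) =====
-- def get_token_type_ids(input_ids, sep_id, max_segs):
--     # single pass: running separator count is the segment type, capped at max_segs-1 (no cap when max_segs <= 1)
--     cap = max_segs - 1 if max_segs >= 2 else None
--     out = []
--     t = 0
--     for x in input_ids:
--         out.append(t)
--         if x == sep_id and (cap is None or t < cap):
--             t += 1
--     return out
-- ===== Notes on version B (the rewrite author's own statement) =====
-- stated objective: simpler
-- what changed: Replaces A's batch counter, staged flushes of [token_type]*ctn, and early return with a single pass that appends a running separator count per element, capped at max_segs-1 (no cap when max_segs <= 1).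
import Mathlib
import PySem

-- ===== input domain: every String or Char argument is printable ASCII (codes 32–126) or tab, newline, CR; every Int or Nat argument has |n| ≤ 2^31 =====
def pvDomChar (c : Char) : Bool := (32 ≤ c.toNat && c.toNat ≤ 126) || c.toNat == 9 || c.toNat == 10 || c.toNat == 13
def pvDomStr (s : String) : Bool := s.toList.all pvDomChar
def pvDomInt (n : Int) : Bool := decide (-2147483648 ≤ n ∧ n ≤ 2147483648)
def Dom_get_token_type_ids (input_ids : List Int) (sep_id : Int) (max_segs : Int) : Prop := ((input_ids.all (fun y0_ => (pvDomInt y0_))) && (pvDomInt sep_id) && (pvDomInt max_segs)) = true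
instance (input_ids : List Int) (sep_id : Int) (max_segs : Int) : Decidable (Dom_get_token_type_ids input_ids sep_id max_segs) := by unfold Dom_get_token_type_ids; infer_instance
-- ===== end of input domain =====

-- B replaces A's staged batch flushing (counter ctn + early return) by one pass that appends a
-- running separator count, capped at max_segs-1; objective: simpler.

-- ===== PORT A =====
-- loop of A: state = (token_type_ids, ctn, token_type, max_segs), iterating enumerate(input_ids)
def get_token_type_ids_go (input_ids : List Int) (sep_id : Int) :
    List Int → Nat → List Int → Nat → Int → Int → List Int
  | [], _, token_type_ids, ctn, token_type, _ =>
      if ctn ≠ 0 then token_type_ids ++ List.replicate ctn token_type else token_type_ids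
  | input_id :: rest, idx, token_type_ids, ctn, token_type, max_segs =>
      let ctn := ctn + 1
      if input_id = sep_id then
        let token_type_ids := token_type_ids ++ List.replicate ctn token_type
        let token_type := token_type + 1
        let max_segs := max_segs - 1
        if max_segs = 1 then
          token_type_ids ++ List.replicate (input_ids.length - (idx + 1)) token_type
        else
          get_token_type_ids_go input_ids sep_id rest (idx + 1) token_type_ids 0 token_type max_segs
      else
        get_token_type_ids_go input_ids sep_id rest (idx + 1) token_type_ids ctn token_type max_segs

def get_token_type_ids (input_ids : List Int) (sep_id : Int) (max_segs : Int) : List Int :=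
  get_token_type_ids_go input_ids sep_id input_ids 0 [] 0 0 max_segs

-- ===== PORT B =====
-- loop of B: state = (out, t); cap = none means no capping (max_segs <= 1)
def get_token_type_ids_alt_go (sep_id : Int) (cap : Option Int) :
    List Int → List Int → Int → List Int
  | [], out, _ => out
  | x :: rest, out, t =>
      let inc := x == sep_id && (match cap with | none => true | some c => decide (t < c))
      get_token_type_ids_alt_go sep_id cap rest (out ++ [t]) (if inc then t + 1 else t)

def get_token_type_ids_alt (input_ids : List Int) (sep_id : Int) (max_segs : Int) : List Int :=
  let cap : Option Int := if 2 ≤ max_segs then some (max_segs - 1) else none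
  get_token_type_ids_alt_go sep_id cap input_ids [] 0

-- ===== PRECONDITION & SPEC =====
def Spec_get_token_type_ids (input_ids : List Int) (sep_id : Int) (max_segs : Int) (out : List Int) : Prop := out = get_token_type_ids_alt input_ids sep_id max_segs
instance (input_ids : List Int) (sep_id : Int) (max_segs : Int) (out : List Int) : Decidable (Spec_get_token_type_ids input_ids sep_id max_segs out) := by unfold Spec_get_token_type_ids; infer_instance

-- ===== CLAIM (what is proved, stated in full; the proofs are below) =====
def Claim_equal_get_token_type_ids : Prop := ∀ (input_ids : List Int) (sep_id : Int) (max_segs : Int), Dom_get_token_type_ids input_ids sep_id max_segs → Spec_get_token_type_ids input_ids sep_id max_segs (get_token_type_ids input_ids sep_id max_segs)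

-- ===== LEMMAS AND PROOFS =====

-- once t has reached the cap, B only appends t and never increments again
lemma alt_go_saturated (sep_id c : Int) (rest out : List Int) :
    get_token_type_ids_alt_go sep_id (some c) rest out c
      = out ++ List.replicate rest.length c := by
  induction rest generalizing out with
  | nil => simp [get_token_type_ids_alt_go]
  | cons x xs ih =>
      simp [get_token_type_ids_alt_go, ih, List.replicate_succ]

-- main loop invariant: A's pending batch (ctn copies of token_type) equals what B already appended
lemma loop_eq (input_ids : List Int) (sep_id ms0 : Int) (rest : List Int) (idx : Nat)
    (acc : List Int) (ctn : Nat) (t : Int)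
    (hlen : input_ids.length = idx + rest.length)
    (ht0 : 0 ≤ t) (ht : 2 ≤ ms0 → t ≤ ms0 - 2) :
    get_token_type_ids_go input_ids sep_id rest idx acc ctn t (ms0 - t)
      = get_token_type_ids_alt_go sep_id (if 2 ≤ ms0 then some (ms0 - 1) else none)
          rest (acc ++ List.replicate ctn t) t := by
  induction rest generalizing idx acc ctn t with
  | nil =>
      by_cases hc : ctn = 0 <;>
        simp [get_token_type_ids_go, get_token_type_ids_alt_go, hc]
  | cons x xs ih =>
      by_cases hx : x = sep_id
      · by_cases hms : ms0 - t - 1 = 1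
        · -- early return in A; B is saturated from here on
          have hms0 : ms0 = t + 2 := by omega
          have hcap : (if 2 ≤ ms0 then some (ms0 - 1) else none) = some (t + 1) := by
            rw [if_pos (by omega)]; congr 1; omega
          have hrest : input_ids.length - (idx + 1) = xs.length := by
            simp at hlen; omega
          simp only [get_token_type_ids_go, get_token_type_ids_alt_go, hx,
            hms, hcap, hrest]
          have : ((sep_id == sep_id) && decide (t < t + 1)) = true := by simp
          rw [this, if_pos rfl, alt_go_saturated]
          simp [List.replicate_succ' (n := ctn), List.append_assoc]
        · -- both sides increment the type and continue
          have hA : get_token_type_ids_go input_ids sep_id (x :: xs) idx acc ctn t (ms0 - t)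
              = get_token_type_ids_go input_ids sep_id xs (idx + 1)
                  (acc ++ List.replicate (ctn + 1) t) 0 (t + 1) (ms0 - t - 1) := by
            simp [get_token_type_ids_go, hx, hms]
          have hinc : ((x == sep_id) &&
              (match (if 2 ≤ ms0 then some (ms0 - 1) else none) with
               | none => true | some c => decide (t < c))) = true := by
            by_cases h2 : 2 ≤ ms0
            · have := ht h2
              simp [hx, if_pos h2]; omega
            · simp [hx, if_neg h2]
          have hB : get_token_type_ids_alt_go sep_id (if 2 ≤ ms0 then some (ms0 - 1) else none)
                (x :: xs) (acc ++ List.replicate ctn t) t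
              = get_token_type_ids_alt_go sep_id (if 2 ≤ ms0 then some (ms0 - 1) else none)
                  xs (acc ++ List.replicate (ctn + 1) t) (t + 1) := by
            simp only [get_token_type_ids_alt_go, hinc]
            congr 1
            simp [List.replicate_succ' (n := ctn), List.append_assoc]
          rw [hA, hB]
          have := ih (idx + 1) (acc ++ List.replicate (ctn + 1) t) 0 (t + 1)
            (by simp at hlen ⊢; omega) (by omega) (by intro h2; have := ht h2; omega)
          simpa [show ms0 - t - 1 = ms0 - (t + 1) by ring] using this
      · -- not a separator: both sides just extend the current batch
        have hA : get_token_type_ids_go input_ids sep_id (x :: xs) idx acc ctn t (ms0 - t)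
            = get_token_type_ids_go input_ids sep_id xs (idx + 1) acc (ctn + 1) t (ms0 - t) := by
          simp [get_token_type_ids_go, hx]
        have hB : get_token_type_ids_alt_go sep_id (if 2 ≤ ms0 then some (ms0 - 1) else none)
              (x :: xs) (acc ++ List.replicate ctn t) t
            = get_token_type_ids_alt_go sep_id (if 2 ≤ ms0 then some (ms0 - 1) else none)
                xs (acc ++ List.replicate (ctn + 1) t) t := by
          simp only [get_token_type_ids_alt_go]
          have hinc : ((x == sep_id) &&
              (match (if 2 ≤ ms0 then some (ms0 - 1) else none) with
               | none => true | some c => decide (t < c))) = false := by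
            simp [hx]
          rw [hinc]
          simp [List.replicate_succ' (n := ctn), List.append_assoc]
        rw [hA, hB]
        exact ih (idx + 1) acc (ctn + 1) t (by simp at hlen ⊢; omega) ht0 ht

-- ===== VERDICT (by name: the statement is the Claim_ definition above) =====
theorem get_token_type_ids_spec : Claim_equal_get_token_type_ids := by
  intro input_ids sep_id max_segs _
  unfold Spec_get_token_type_ids get_token_type_ids get_token_type_ids_alt
  have := loop_eq input_ids sep_id max_segs input_ids 0 [] 0 0 (by simp) le_rfl
    (by intro h; omega)
  simpa using this
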